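-- pv_equiv track=rewrite | github.com/Revi1337/BaekJoon-Coding-Test | 백준/Silver/18429. 근손실/근손실.py | solution
-- ===== SOURCE A (Python) =====
-- from itertools import permutations
--
-- def solution(N, K, A):
--     days = {day: A[day - 1] for day in range(1, N + 1)}
--     answer = 0
--     tmp = permutations(days.keys())
--     weight = 500
--     for line in tmp:
--         target = weight
--         fail = False
--         for day in line:
--             target += days[day] - K
--             if target < weight:
--                 fail = True
--                 break
--         if not fail:
--             answer += 1
--     return answer
-- ===== SOURCE B (Python) =====
-- def solution(N, K, A):
--     n = N if N > 0 else 0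
--     delta = [A[i] - K for i in range(n)]
--     total = sum(delta)
--     memo = {}
--
--     def count(mask):
--         # number of valid orderings of the days still in `mask`, given that the
--         # days outside `mask` were already trained (their delta sum is `used`)
--         if mask == 0:
--             return 1
--         if mask in memo:
--             return memo[mask]
--         used = total - sum(delta[i] for i in range(n) if mask >> i & 1)
--         res = 0
--         for i in range(n):
--             if mask >> i & 1 and used + delta[i] >= 0:
--                 res += count(mask - (1 << i))
--         memo[mask] = res
--         return res
--
--     return count((1 << n) - 1)
-- ===== Notes on version B (the rewrite author's own statement) =====
-- stated objective: alternative
-- what changed: replaces brute-force enumeration of all N! permutations with a memoized subset-DP over bitmasks (the accumulated weight after training a set of days depends only on the set, not the order), counting valid orderings per remaining-set mask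
import Mathlib
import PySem

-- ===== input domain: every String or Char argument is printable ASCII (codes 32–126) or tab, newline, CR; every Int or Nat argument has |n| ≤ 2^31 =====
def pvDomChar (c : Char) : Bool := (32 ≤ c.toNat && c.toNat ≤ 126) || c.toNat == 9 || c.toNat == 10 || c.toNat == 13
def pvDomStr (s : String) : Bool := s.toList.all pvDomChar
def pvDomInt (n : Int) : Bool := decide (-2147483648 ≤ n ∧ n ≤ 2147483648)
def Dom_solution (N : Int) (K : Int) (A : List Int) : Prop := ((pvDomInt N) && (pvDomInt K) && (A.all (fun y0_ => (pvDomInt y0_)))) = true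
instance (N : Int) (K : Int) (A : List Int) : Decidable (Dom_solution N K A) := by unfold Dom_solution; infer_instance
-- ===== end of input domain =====

-- B replaces A's enumeration of all N! permutations with a memoized subset-DP over
-- bitmasks (the accumulated weight depends only on the set of days already trained):
-- a genuinely different counting algorithm with the same return value.


-- ===== PORT A =====
-- inner 'for day in line' loop with its break: returns the final value of 'fail'
def solutionFail (days : PySem.Dict Int Int) (K : Int) : List Int → Int → Bool
  | [], _ => false
  | day :: rest, target =>
    let target := target + days.getD day 0 - K
    if target < 500 then true else solutionFail days K rest target

def solution (N : Int) (K : Int) (A : List Int) : Int :=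
  let days : PySem.Dict Int Int :=
    (PySem.List.pyRange 1 (N + 1) 1).foldl
      (fun d day => d.insert day (PySem.List.pyGetD A (day - 1) 0)) PySem.Dict.empty
  let tmp := PySem.List.permutations days.keys days.keys.length
  tmp.foldl (fun answer line => if !solutionFail days K line 500 then answer + 1 else answer) 0

-- ===== PORT B =====
-- Source B's recursive count(mask); the Python memo is dropped (pure function, same values),
-- and 'fuel' only makes the recursion structural — every call is made with mask ≤ fuel.
def altCount (delta : List Int) (total : Int) (n : Nat) : Nat → Nat → Int
  | fuel, mask =>
    if mask = 0 then 1
    else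
      match fuel with
      | 0 => 0
      | fuel + 1 =>
        let used := total -
          (List.range n).foldl
            (fun acc i => if (mask >>> i) &&& 1 = 1 then acc + delta.getD i 0 else acc) 0
        (List.range n).foldl
          (fun res i =>
            if (mask >>> i) &&& 1 = 1 ∧ 0 ≤ used + delta.getD i 0 then
              res + altCount delta total n fuel (mask - (1 <<< i))
            else res) 0

def solution_alt (N : Int) (K : Int) (A : List Int) : Int :=
  let n : Nat := N.toNat
  let delta := (List.range n).map (fun (i : Nat) => PySem.List.pyGetD A (i : Int) 0 - K)
  let total := delta.sum
  altCount delta total n ((1 <<< n) - 1) ((1 <<< n) - 1)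

-- ===== PRECONDITION & SPEC =====
-- Pre_ excludes exactly the inputs on which the Python A raises IndexError (N > len(A),
-- the dict comprehension reads A[day-1] out of range); B raises there too.
def Pre_solution (N : Int) (_K : Int) (A : List Int) : Prop := N ≤ (A.length : Int)
instance (N : Int) (K : Int) (A : List Int) : Decidable (Pre_solution N K A) := by unfold Pre_solution; infer_instance
def pvWitness_solution : Int × Int × List Int := (3, 2, [1, 4, 3])

def Spec_solution (N : Int) (K : Int) (A : List Int) (out : Int) : Prop := out = solution_alt N K A
instance (N : Int) (K : Int) (A : List Int) (out : Int) : Decidable (Spec_solution N K A out) := by unfold Spec_solution; infer_instance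

-- ===== CLAIM (what is proved, stated in full; the proofs are below) =====
def Claim_equal_solution : Prop := ∀ (N : Int) (K : Int) (A : List Int), Dom_solution N K A → Pre_solution N K A → Spec_solution N K A (solution N K A)

-- ===== LEMMAS AND PROOFS =====

def okFrom : Int → List Int → Bool
  | _, [] => true
  | t, x :: l => if t + x < 0 then false else okFrom (t + x) l

def permCount (avail : List Int) (t : Int) : Int :=
  ((PySem.List.permutations avail avail.length).countP (okFrom t) : Int)

lemma permCount_nil (t : Int) : permCount [] t = 1 := by
  simp [permCount, okFrom]

lemma permCount_cons (a : Int) (as : List Int) (t : Int) :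
    permCount (a :: as) t =
      ((List.range (a :: as).length).map (fun i =>
        if 0 ≤ t + (a :: as).getD i 0 then permCount ((a :: as).eraseIdx i) (t + (a :: as).getD i 0)
        else 0)).sum := by
  unfold permCount
  rw [show (a :: as).length = as.length + 1 from rfl]
  rw [PySem.List.permutations]
  rw [List.countP_flatMap, Nat.cast_list_sum, List.map_map]
  refine congrArg List.sum (List.map_congr_left ?_)
  intro i hi
  have hi' : i < (a :: as).length := by simpa using List.mem_range.mp hi
  have hg : (a :: as).getD i 0 = (a :: as)[i] := List.getD_eq_getElem _ _ hi'
  simp only [Function.comp_apply, List.getElem?_eq_getElem hi']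
  rw [List.countP_map, hg]
  by_cases hc : t + (a :: as)[i] < 0
  · have h1 : ((okFrom t) ∘ fun p => (a :: as)[i] :: p) = fun _ => false := by
      funext p; simp [Function.comp, okFrom, hc]
    rw [h1, if_neg (not_le.mpr hc)]
    simp
  · have h1 : ((okFrom t) ∘ fun p => (a :: as)[i] :: p) = okFrom (t + (a :: as)[i]) := by
      funext p; simp [Function.comp, okFrom, hc]
    rw [h1, if_pos (by omega : (0:Int) ≤ t + (a :: as)[i])]
    rw [List.length_eraseIdx, if_pos hi']
    rfl

def subMask : List Int → Nat → List Int
  | [], _ => []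
  | d :: ds, m => (if m % 2 = 1 then [d] else []) ++ subMask ds (m / 2)

lemma subMask_zero (ds : List Int) : subMask ds 0 = [] := by
  induction ds with
  | nil => rfl
  | cons d ds ih => simp [subMask, ih]

lemma subMask_all (ds : List Int) : subMask ds (2 ^ ds.length - 1) = ds := by
  induction ds with
  | nil => rfl
  | cons d ds ih =>
    have hp : (0:Nat) < 2 ^ ds.length := Nat.two_pow_pos _
    have h2 : 2 ^ (d :: ds).length = 2 * 2 ^ ds.length := by
      rw [List.length_cons, pow_succ]; ring
    simp only [subMask, h2]
    have hm : (2 * 2 ^ ds.length - 1) % 2 = 1 := by omega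
    have hd : (2 * 2 ^ ds.length - 1) / 2 = 2 ^ ds.length - 1 := by omega
    rw [hm, hd, ih]; simp

lemma subMask_ne_nil (ds : List Int) : ∀ mask : Nat, mask ≠ 0 → mask < 2 ^ ds.length →
    subMask ds mask ≠ [] := by
  induction ds with
  | nil => intro mask h1 h2; simp at h2; omega
  | cons d ds ih =>
    intro mask h1 h2
    simp only [subMask]
    by_cases hm : mask % 2 = 1
    · simp [hm]
    · have h2' : 2 ^ (d :: ds).length = 2 * 2 ^ ds.length := by
        rw [List.length_cons, pow_succ]; ring
      rw [if_neg hm]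
      simp only [List.nil_append]
      exact ih (mask / 2) (by omega) (by omega)

lemma mask_sub_pow (mask i : Nat) (h : (mask / 2).testBit i = true) :
    (mask - 2 ^ (i + 1)) % 2 = mask % 2 ∧ (mask - 2 ^ (i + 1)) / 2 = mask / 2 - 2 ^ i := by
  have h2 : 2 ^ i ≤ mask / 2 := Nat.ge_two_pow_of_testBit h
  have hs : 2 ^ (i + 1) = 2 * 2 ^ i := by rw [pow_succ]; ring
  omega

lemma subMask_reindex (ds : List Int) (step : Int → List Int → Int) :
    ∀ mask : Nat, mask < 2 ^ ds.length →
      ((List.range (subMask ds mask).length).map (fun j =>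
          step ((subMask ds mask).getD j 0) ((subMask ds mask).eraseIdx j))).sum
        = ((List.range ds.length).map (fun i =>
            if mask.testBit i then step (ds.getD i 0) (subMask ds (mask - 2 ^ i)) else 0)).sum := by
  induction ds generalizing step with
  | nil =>
    intro mask h
    simp at h
    subst h
    simp [subMask]
  | cons d ds ih =>
    intro mask h
    have h2 : 2 ^ (d :: ds).length = 2 * 2 ^ ds.length := by
      rw [List.length_cons, pow_succ]; ring
    have hmlt : mask / 2 < 2 ^ ds.length := by omega
    -- RHS: peel index 0
    rw [show (d :: ds).length = ds.length + 1 from rfl, List.range_succ_eq_map,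
        List.map_cons, List.sum_cons, List.map_map]
    have htail : ∀ i ∈ List.range ds.length,
        ((fun i => if mask.testBit i then step ((d :: ds).getD i 0) (subMask (d :: ds) (mask - 2 ^ i)) else 0) ∘ Nat.succ) i
          = (fun i => if (mask / 2).testBit i then step (ds.getD i 0) ((if mask % 2 = 1 then [d] else []) ++ subMask ds (mask / 2 - 2 ^ i)) else 0) i := by
      intro i _
      simp only [Function.comp_apply]
      rw [Nat.testBit_add_one]
      by_cases hb : (mask / 2).testBit i
      · rw [if_pos hb, if_pos hb]
        have := mask_sub_pow mask i hb
        have hsub : subMask (d :: ds) (mask - 2 ^ (i + 1))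
            = (if mask % 2 = 1 then [d] else []) ++ subMask ds (mask / 2 - 2 ^ i) := by
          simp only [subMask, this.1, this.2]
        rw [hsub]
        rfl
      · rw [if_neg (by simpa using hb), if_neg (by simpa using hb)]
    rw [List.map_congr_left htail]
    by_cases hm : mask % 2 = 1
    · -- head bit set
      have hhead : (Nat.testBit mask 0) = true := by simp [Nat.testBit_zero, hm]
      rw [hhead, if_pos rfl]
      have hm1 : (mask - 2 ^ 0) % 2 = 0 := by omega
      have hm2 : (mask - 2 ^ 0) / 2 = mask / 2 := by omega
      have hsub0 : subMask (d :: ds) (mask - 2 ^ 0) = subMask ds (mask / 2) := by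
        simp only [subMask, hm1, hm2]; simp
      rw [hsub0]
      -- LHS: subMask (d :: ds) mask = d :: subMask ds (mask / 2)
      have hsub : subMask (d :: ds) mask = d :: subMask ds (mask / 2) := by
        simp only [subMask, hm]; simp
      rw [hsub]
      rw [show (d :: subMask ds (mask / 2)).length = (subMask ds (mask / 2)).length + 1 from rfl,
          List.range_succ_eq_map, List.map_cons, List.sum_cons, List.map_map]
      have hL : ∀ j ∈ List.range (subMask ds (mask / 2)).length,
          ((fun j => step ((d :: subMask ds (mask / 2)).getD j 0) ((d :: subMask ds (mask / 2)).eraseIdx j)) ∘ Nat.succ) j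
            = (fun j => (fun x l => step x (d :: l)) ((subMask ds (mask / 2)).getD j 0) ((subMask ds (mask / 2)).eraseIdx j)) j := by
        intro j _
        rfl
      rw [List.map_congr_left hL]
      rw [ih (fun x l => step x (d :: l)) (mask / 2) hmlt]
      simp [hm]
    · have hhead : (Nat.testBit mask 0) = false := by simp [Nat.testBit_zero, hm]
      rw [hhead]
      have hsub : subMask (d :: ds) mask = subMask ds (mask / 2) := by
        simp only [subMask, if_neg hm]; simp
      rw [hsub, if_neg (by simp)]
      rw [ih step (mask / 2) hmlt]
      simp only [zero_add]
      refine congrArg List.sum (List.map_congr_left ?_)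
      intro i _
      by_cases hb : (mask / 2).testBit i
      · simp [hb, hm]
      · simp [hb]

lemma sum_getD_range (l : List Int) :
    ((List.range l.length).map (fun j => l.getD j 0)).sum = l.sum := by
  induction l with
  | nil => rfl
  | cons x xs ih =>
    rw [show (x :: xs).length = xs.length + 1 from rfl, List.range_succ_eq_map,
        List.map_cons, List.sum_cons, List.map_map]
    have : ∀ j ∈ List.range xs.length,
        ((fun j => (x :: xs).getD j 0) ∘ Nat.succ) j = (fun j => xs.getD j 0) j := by
      intro j _; rfl
    rw [List.map_congr_left this, ih]
    rfl

lemma subMask_sum_sub (ds : List Int) :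
    ∀ (mask i : Nat), i < ds.length → mask.testBit i = true →
      (subMask ds mask).sum = (subMask ds (mask - 2 ^ i)).sum + ds.getD i 0 := by
  induction ds with
  | nil => intro mask i h; simp at h
  | cons d ds ih =>
    intro mask i hi hb
    match i with
    | 0 =>
      have hm : mask % 2 = 1 := by simpa [Nat.testBit_zero] using hb
      have hm1 : (mask - 2 ^ 0) % 2 = 0 := by omega
      have hm2 : (mask - 2 ^ 0) / 2 = mask / 2 := by omega
      simp only [subMask, hm, hm1, hm2]
      simp
      ring
    | i + 1 =>
      have hb' : (mask / 2).testBit i = true := by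
        rwa [Nat.testBit_add_one] at hb
      have hmp := mask_sub_pow mask i hb'
      simp only [subMask, hmp.1, hmp.2, List.sum_append]
      rw [ih (mask / 2) i (by simpa using hi) hb']
      by_cases hm : mask % 2 = 1
      · simp [hm]; ring
      · simp [hm]

lemma testBit_iff (mask i : Nat) : ((mask >>> i) &&& 1 = 1) ↔ mask.testBit i = true := by
  induction i generalizing mask with
  | zero => simp [Nat.testBit_zero, Nat.and_one_is_mod, Nat.shiftRight_eq_div_pow]
  | succ i ih =>
    rw [Nat.testBit_add_one, ← ih (mask / 2)]
    rw [Nat.shiftRight_eq_div_pow, Nat.shiftRight_eq_div_pow, Nat.div_div_eq_div_mul, pow_succ']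

lemma foldl_cond_sum (l : List Nat) (c : Nat → Prop) [DecidablePred c] (g : Nat → Int) (a : Int) :
    l.foldl (fun acc i => if c i then acc + g i else acc) a
      = a + (l.map (fun i => if c i then g i else 0)).sum := by
  rw [PySem.List.foldl_congr_mem' l _ (fun acc i => acc + if c i then g i else 0) a
    (by intro i _ acc; by_cases h : c i <;> simp [h])]
  exact PySem.List.foldl_add l (fun i => if c i then g i else 0) a

lemma permCount_ne_nil (l : List Int) (h : l ≠ []) (t : Int) :
    permCount l t =
      ((List.range l.length).map (fun i =>
        if 0 ≤ t + l.getD i 0 then permCount (l.eraseIdx i) (t + l.getD i 0) else 0)).sum := by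
  obtain ⟨a, as, rfl⟩ := List.exists_cons_of_ne_nil h
  exact permCount_cons a as t

lemma bit_map_congr (mask n : Nat) (g g' : Nat → Int)
    (h : ∀ i, i < n → mask.testBit i = true → g i = g' i) :
    (List.range n).map (fun i => if (mask >>> i) &&& 1 = 1 then g i else 0)
      = (List.range n).map (fun i => if mask.testBit i then g' i else 0) := by
  refine List.map_congr_left ?_
  intro i hi
  by_cases hb : mask.testBit i
  · rw [if_pos ((testBit_iff mask i).mpr hb), if_pos hb, h i (List.mem_range.mp hi) hb]
  · rw [if_neg (fun hc => hb ((testBit_iff mask i).mp hc)), if_neg hb]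

lemma altCount_eq_permCount (ds : List Int) :
    ∀ (fuel mask : Nat), mask ≤ fuel → mask < 2 ^ ds.length →
      altCount ds ds.sum ds.length fuel mask
        = permCount (subMask ds mask) (ds.sum - (subMask ds mask).sum) := by
  intro fuel
  induction fuel with
  | zero =>
    intro mask h1 h2
    have : mask = 0 := by omega
    subst this
    rw [altCount, if_pos rfl, subMask_zero, permCount_nil]
  | succ f ih =>
    intro mask h1 h2
    by_cases hm : mask = 0
    · subst hm
      rw [altCount, if_pos rfl, subMask_zero, permCount_nil]
    · rw [altCount, if_neg hm]
      simp only []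
      rw [foldl_cond_sum, zero_add]
      have hused : List.foldl (fun acc i => if mask >>> i &&& 1 = 1 then acc + ds.getD i 0 else acc) 0
          (List.range ds.length) = (subMask ds mask).sum := by
        rw [foldl_cond_sum, zero_add]
        rw [bit_map_congr mask ds.length _ _ (fun i _ _ => rfl)]
        rw [← subMask_reindex ds (fun x _ => x) mask h2]
        exact sum_getD_range _
      simp only [hused]
      have hmap : ∀ i ∈ List.range ds.length,
          (fun i => if (mask >>> i &&& 1 = 1 ∧ 0 ≤ ds.sum - (subMask ds mask).sum + ds.getD i 0) then
              altCount ds ds.sum ds.length f (mask - 1 <<< i) else 0) i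
            = (fun i => if mask.testBit i then
                (if 0 ≤ ds.sum - (subMask ds mask).sum + ds.getD i 0 then
                  permCount (subMask ds (mask - 2 ^ i)) (ds.sum - (subMask ds mask).sum + ds.getD i 0)
                 else 0) else 0) i := by
        intro i hi
        beta_reduce
        have hilt : i < ds.length := List.mem_range.mp hi
        by_cases hb : mask.testBit i
        · have hbit : mask >>> i &&& 1 = 1 := (testBit_iff mask i).mpr hb
          have h2i : 2 ^ i ≤ mask := Nat.ge_two_pow_of_testBit hb
          have hshift : (1 : Nat) <<< i = 2 ^ i := by rw [Nat.shiftLeft_eq, one_mul]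
          have hp1 : 0 < 2 ^ i := Nat.two_pow_pos i
          by_cases hc : 0 ≤ ds.sum - (subMask ds mask).sum + ds.getD i 0
          · rw [if_pos ⟨hbit, hc⟩, if_pos hb, if_pos hc, hshift]
            rw [ih (mask - 2 ^ i) (by omega) (by omega)]
            have := subMask_sum_sub ds mask i hilt hb
            congr 1
            omega
          · rw [if_neg (fun hand => hc hand.2), if_pos hb, if_neg hc]
        · rw [if_neg (fun hand => hb ((testBit_iff mask i).mp hand.1)), if_neg hb]
      rw [List.map_congr_left hmap]
      rw [permCount_ne_nil _ (subMask_ne_nil ds mask hm h2)]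
      rw [subMask_reindex ds (fun x l => if 0 ≤ ds.sum - (subMask ds mask).sum + x then
            permCount l (ds.sum - (subMask ds mask).sum + x) else 0) mask h2]

lemma permutations_map (g : Int → Int) :
    ∀ (r : Nat) (l : List Int),
      PySem.List.permutations (l.map g) r = (PySem.List.permutations l r).map (List.map g) := by
  intro r
  induction r with
  | zero => intro l; rw [PySem.List.permutations, PySem.List.permutations]; rfl
  | succ r ih =>
    intro l
    rw [PySem.List.permutations, PySem.List.permutations]
    rw [List.map_flatMap, List.length_map]
    refine List.flatMap_congr ?_
    intro i _
    rw [List.getElem?_map, List.eraseIdx_map]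
    cases h : l[i]? with
    | none => simp
    | some x =>
      simp only [Option.map_some]
      rw [ih (l.eraseIdx i), List.map_map, List.map_map]
      rfl

lemma fail_eq_okFrom (days : PySem.Dict Int Int) (K : Int) (f : Int → Int) :
    ∀ (line : List Int), (∀ d ∈ line, days.getD d 0 = f d) → ∀ t : Int,
      solutionFail days K line t = !okFrom (t - 500) (line.map (fun d => f d - K)) := by
  intro line
  induction line with
  | nil => intro _ t; simp [solutionFail, okFrom]
  | cons d rest ih =>
    intro h t
    rw [solutionFail]
    rw [h d (List.mem_cons_self)]
    rw [List.map_cons]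
    rw [show okFrom (t - 500) ((f d - K) :: rest.map (fun d => f d - K))
        = if (t - 500) + (f d - K) < 0 then false
          else okFrom ((t - 500) + (f d - K)) (rest.map (fun d => f d - K)) from rfl]
    by_cases hc : t + f d - K < 500
    · rw [if_pos hc, if_pos (by omega : (t - 500) + (f d - K) < 0)]
      rfl
    · rw [if_neg hc, if_neg (by omega : ¬ ((t - 500) + (f d - K) < 0))]
      rw [ih (fun x hx => h x (List.mem_cons_of_mem d hx)) (t + f d - K)]
      have harg : t + f d - K - 500 = t - 500 + (f d - K) := by ring
      rw [harg]

lemma solution_eq_permCount (N K : Int) (A : List Int) :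
    solution N K A
      = permCount ((List.range N.toNat).map (fun (i : Nat) => PySem.List.pyGetD A (i : Int) 0 - K)) 0 := by
  rw [solution]
  set keysL := PySem.List.pyRange 1 (N + 1) 1 with hkeysL
  set v : Int → Int := fun day => PySem.List.pyGetD A (day - 1) 0 with hv
  set days : PySem.Dict Int Int :=
    keysL.foldl (fun d day => d.insert day (v day)) PySem.Dict.empty with hdays
  have hnodupK : keysL.Nodup := PySem.List.nodup_pyRange_one 1 (N + 1)
  have h_items : days.items = keysL.map (fun day => (day, v day)) := by
    rw [hdays]
    rw [PySem.Dict.items_foldl_insert_fresh keysL (fun a => a) v PySem.Dict.empty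
      (fun a _ => PySem.Dict.contains_empty a) (by simpa using hnodupK)]
    rfl
  have h_keys : days.keys = keysL := by
    simp only [PySem.Dict.keys, h_items, List.map_map]
    exact List.map_congr_left (fun a _ => rfl) |>.trans (List.map_id keysL)
  have h_nodup : days.keys.Nodup := by rw [h_keys]; exact hnodupK
  have h_get : ∀ d ∈ keysL, days.getD d 0 = v d := by
    intro d hd
    exact PySem.Dict.getD_of_mem_items days
      (by rw [h_items]; exact List.mem_map_of_mem hd) h_nodup 0
  rw [h_keys]
  rw [PySem.List.foldl_if_add_one (fun line => !solutionFail days K line 500)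
        (PySem.List.permutations keysL keysL.length) 0, zero_add]
  have hcongr : List.countP (fun line => !solutionFail days K line 500)
      (PySem.List.permutations keysL keysL.length)
      = List.countP (fun line => okFrom 0 (line.map (fun d => v d - K)))
          (PySem.List.permutations keysL keysL.length) := by
    refine List.countP_congr ?_
    intro line hline
    have hperm := PySem.List.perm_of_mem_permutations hline
    have hmem : ∀ d ∈ line, days.getD d 0 = v d := fun d hd => h_get d (hperm.mem_iff.mp hd)
    rw [fail_eq_okFrom days K v line hmem 500]
    norm_num
  rw [hcongr]
  have hmap : List.countP (fun line => okFrom 0 (line.map (fun d => v d - K)))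
      (PySem.List.permutations keysL keysL.length)
      = List.countP (okFrom 0)
          ((PySem.List.permutations keysL keysL.length).map (List.map (fun d => v d - K))) := by
    rw [List.countP_map]
    rfl
  rw [hmap, ← permutations_map (fun d => v d - K) keysL.length keysL]
  have hds : keysL.map (fun d => v d - K)
      = (List.range N.toNat).map (fun (i : Nat) => PySem.List.pyGetD A (i : Int) 0 - K) := by
    rw [hkeysL, PySem.List.pyRange_one, List.map_map]
    have hN : (N + 1 - 1).toNat = N.toNat := by norm_num
    rw [hN]
    refine List.map_congr_left ?_
    intro k _
    simp only [Function.comp_apply, hv]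
    have : (1 : Int) + k - 1 = (k : Int) := by ring
    rw [this]
  rw [hds]
  rw [permCount]
  have hlen : ((List.range N.toNat).map (fun (i : Nat) => PySem.List.pyGetD A (i : Int) 0 - K)).length
      = keysL.length := by
    simp [hkeysL, PySem.List.pyRange_one]
  rw [hlen]

lemma alt_eq_permCount (N K : Int) (A : List Int) :
    solution_alt N K A
      = permCount ((List.range N.toNat).map (fun (i : Nat) => PySem.List.pyGetD A (i : Int) 0 - K)) 0 := by
  rw [solution_alt]
  set ds := (List.range N.toNat).map (fun (i : Nat) => PySem.List.pyGetD A (i : Int) 0 - K) with hds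
  have hlen : N.toNat = ds.length := by simp [hds]
  have hsh : (1 : Nat) <<< ds.length = 2 ^ ds.length := by
    rw [Nat.shiftLeft_eq, one_mul]
  have hp : 0 < 2 ^ ds.length := Nat.two_pow_pos _
  rw [hlen, hsh]
  rw [altCount_eq_permCount ds (2 ^ ds.length - 1) (2 ^ ds.length - 1) le_rfl (by omega)]
  rw [subMask_all, sub_self]


-- ===== VERDICT (by name: the statement is the Claim_ definition above) =====
theorem solution_spec : Claim_equal_solution := by
  intro N K A _ _
  unfold Spec_solution
  rw [solution_eq_permCount, alt_eq_permCount]
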